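-- pv_equiv track=rewrite | github.com/benoitmasse/kano-pixel | apps/main.py | anim_moon
-- ===== SOURCE A (Python) =====
-- def px(f, row, col, color):
--     if 0 <= row < 8 and 0 <= col < 16:
--         f[row * 16 + col] = color
--
-- MOON_PX = [(1,6),(1,7),(2,5),(2,6),(2,7),(3,4),(3,5),(3,6),
--             (4,4),(4,5),(4,6),(5,5),(5,6),(5,7),(6,6),(6,7)]
--
-- STAR_PX = [(0,10),(0,13),(1,12),(2,15),(3,11),(4,14),(5,12),
--             (6,10),(7,13),(7,9),(0,3),(6,2)]
--
-- def anim_moon(tick):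
--     f = [(0,0,16)] * 128
--     M = (255,238,136)
--     for r,c in MOON_PX: px(f,r,c,M)
--     for i,(r,c) in enumerate(STAR_PX):
--         phase = (tick + i*7) % 24
--         if phase < 18: px(f,r,c,(255,255,255) if phase < 12 else (102,102,102))
--     return f
-- ===== SOURCE B (Python) =====
-- MOON_PX = [(1,6),(1,7),(2,5),(2,6),(2,7),(3,4),(3,5),(3,6),
--             (4,4),(4,5),(4,6),(5,5),(5,6),(5,7),(6,6),(6,7)]
--
-- STAR_PX = [(0,10),(0,13),(1,12),(2,15),(3,11),(4,14),(5,12),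
--             (6,10),(7,13),(7,9),(0,3),(6,2)]
--
-- def anim_moon(tick):
--     moon_set = {r * 16 + c for r, c in MOON_PX}
--     star_color = {}
--     for i, (r, c) in enumerate(STAR_PX):
--         phase = (tick + i * 7) % 24
--         if phase < 18:
--             star_color[r * 16 + c] = (255, 255, 255) if phase < 12 else (102, 102, 102)
--     M = (255, 238, 136)
--     return [M if idx in moon_set else star_color.get(idx, (0, 0, 16))
--             for idx in range(128)]
-- ===== Notes on version B (the rewrite author's own statement) =====
-- stated objective: alternative
-- what changed: Instead of allocating a background frame and sparsely overwriting pixels through a bounds-checked px() setter, B builds a moon index set and a star index->color dict once, then produces the frame as a single dense per-index classification comprehension over range(128).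
import Mathlib
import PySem

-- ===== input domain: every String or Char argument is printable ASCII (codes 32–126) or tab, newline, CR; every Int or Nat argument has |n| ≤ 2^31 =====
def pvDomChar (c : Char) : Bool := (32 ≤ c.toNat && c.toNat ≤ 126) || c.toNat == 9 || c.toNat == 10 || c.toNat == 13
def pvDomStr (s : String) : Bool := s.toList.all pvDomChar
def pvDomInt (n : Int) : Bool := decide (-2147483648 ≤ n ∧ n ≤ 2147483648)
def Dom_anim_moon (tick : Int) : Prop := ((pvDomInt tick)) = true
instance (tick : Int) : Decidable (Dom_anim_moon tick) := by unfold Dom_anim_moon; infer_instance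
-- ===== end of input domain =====

-- ===== PORT A =====
-- B changes the decomposition (dense per-index classification via a set and a dict instead of sparse overwrites); same cost.
def MOON_PX : List (Int × Int) := [(1,6),(1,7),(2,5),(2,6),(2,7),(3,4),(3,5),(3,6),
  (4,4),(4,5),(4,6),(5,5),(5,6),(5,7),(6,6),(6,7)]

def STAR_PX : List (Int × Int) := [(0,10),(0,13),(1,12),(2,15),(3,11),(4,14),(5,12),
  (6,10),(7,13),(7,9),(0,3),(6,2)]

def px (f : List (Int × Int × Int)) (row col : Int) (color : Int × Int × Int) :
    List (Int × Int × Int) :=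
  if 0 ≤ row ∧ row < 8 ∧ 0 ≤ col ∧ col < 16 then PySem.List.pySetD f (row * 16 + col) color
  else f

def phaseOf (tick i : Int) : Int := PySem.Int.mod (tick + i * 7) 24

def anim_moon (tick : Int) : List (Int × Int × Int) :=
  (PySem.List.enumerate STAR_PX).foldl
    (fun f irc =>
      if phaseOf tick irc.1 < 18 then
        px f irc.2.1 irc.2.2
          (if phaseOf tick irc.1 < 12 then (255, 255, 255) else (102, 102, 102))
      else f)
    (MOON_PX.foldl (fun f rc => px f rc.1 rc.2 (255, 238, 136))
      (List.replicate 128 ((0 : Int), (0 : Int), (16 : Int))))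

-- ===== PORT B =====
def anim_moon_alt (tick : Int) : List (Int × Int × Int) :=
  let moonSet : PySem.Set Int := PySem.Set.ofList (MOON_PX.map (fun rc => rc.1 * 16 + rc.2))
  let starColor : PySem.Dict Int (Int × Int × Int) :=
    (PySem.List.enumerate STAR_PX).foldl
      (fun d irc =>
        if phaseOf tick irc.1 < 18 then
          d.insert (irc.2.1 * 16 + irc.2.2)
            (if phaseOf tick irc.1 < 12 then (255, 255, 255) else (102, 102, 102))
        else d)
      PySem.Dict.empty
  (PySem.List.pyRange 0 128 1).map (fun idx =>
    if PySem.Set.contains moonSet idx then (255, 238, 136) else starColor.getD idx (0, 0, 16))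

-- ===== PRECONDITION & SPEC =====
def Spec_anim_moon (tick : Int) (out : List (Int × Int × Int)) : Prop := out = anim_moon_alt tick
instance (tick : Int) (out : List (Int × Int × Int)) : Decidable (Spec_anim_moon tick out) := by
  unfold Spec_anim_moon; infer_instance

-- ===== CLAIM (what is proved, stated in full; the proofs are below) =====
def Claim_equal_anim_moon : Prop := ∀ (tick : Int), Dom_anim_moon tick → Spec_anim_moon tick (anim_moon tick)

-- ===== LEMMAS AND PROOFS =====
theorem phaseOf_emod (tick i : Int) : phaseOf tick i = phaseOf (tick % 24) i := by
  unfold phaseOf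
  rw [PySem.Int.mod_eq_emod_of_pos (by norm_num), PySem.Int.mod_eq_emod_of_pos (by norm_num)]
  omega

theorem anim_moon_period (tick : Int) : anim_moon tick = anim_moon (tick % 24) := by
  unfold anim_moon
  congr 1
  funext f irc
  rw [phaseOf_emod]

theorem anim_moon_alt_period (tick : Int) : anim_moon_alt tick = anim_moon_alt (tick % 24) := by
  have h : (fun (d : PySem.Dict Int (Int × Int × Int)) (irc : Int × (Int × Int)) =>
        if phaseOf tick irc.1 < 18 then
          d.insert (irc.2.1 * 16 + irc.2.2)
            (if phaseOf tick irc.1 < 12 then ((255 : Int), (255 : Int), (255 : Int)) else (102, 102, 102))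
        else d)
      = (fun d irc =>
        if phaseOf (tick % 24) irc.1 < 18 then
          d.insert (irc.2.1 * 16 + irc.2.2)
            (if phaseOf (tick % 24) irc.1 < 12 then (255, 255, 255) else (102, 102, 102))
        else d) := by
    funext d irc
    rw [phaseOf_emod]
  unfold anim_moon_alt
  rw [h]

set_option maxRecDepth 100000 in
set_option maxHeartbeats 2000000 in
theorem anim_moon_eq_small (t : Int) (h0 : 0 ≤ t) (h1 : t < 24) :
    anim_moon t = anim_moon_alt t := by
  interval_cases t <;> decide

-- ===== VERDICT (by name: the statement is the Claim_ definition above) =====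
theorem anim_moon_spec : Claim_equal_anim_moon := by
  intro tick _
  unfold Spec_anim_moon
  rw [anim_moon_period, anim_moon_alt_period]
  exact anim_moon_eq_small _ (Int.emod_nonneg _ (by norm_num)) (Int.emod_lt_of_pos _ (by norm_num))
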